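-- pv_equiv track=rewrite | github.com/markuus83/1-Daw-2024-25 | Programacion/1º Trimestre/Exames/solucions/exer3.py | comprobar_palabra
-- ===== SOURCE A (Python) =====
-- def comprobar_palabra(palabra):
--     """
--     Comproba que unha cadea de texto é unha única palabra
--
--     Args:
--         palabra (str): A cadea que desexamos comprobar
--
--     Returns:
--         boolean: Verdadeiro se é unha palabra, falso en caso contrario
--     """
--     if type(palabra) is not str:
--         return False
--     if " " in palabra:
--         return False
--     palabra = palabra.lower()
--     for letra in palabra:
--         if ord(letra) > 122 or ord(letra) < 97:
--             return False
--     return True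
-- ===== SOURCE B (Python) =====
-- def comprobar_palabra(palabra):
--     if type(palabra) is not str:
--         return False
--     lowered = palabra.lower()
--     if not lowered:
--         return True
--     # a-z is a contiguous code-point interval, so it suffices to bound the
--     # extremal characters; any space (or other outsider) falls outside [a, z].
--     return "a" <= min(lowered) and max(lowered) <= "z"
-- ===== Notes on version B (the rewrite author's own statement) =====
-- stated objective: alternative
-- what changed: Instead of scanning every character with ord-range checks (plus a separate space check), B computes the minimum and maximum characters of the lowered string and checks only those two extremes against the alphabet bounds, correct because the lowercase alphabet is a contiguous code-point interval.
import Mathlib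
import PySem

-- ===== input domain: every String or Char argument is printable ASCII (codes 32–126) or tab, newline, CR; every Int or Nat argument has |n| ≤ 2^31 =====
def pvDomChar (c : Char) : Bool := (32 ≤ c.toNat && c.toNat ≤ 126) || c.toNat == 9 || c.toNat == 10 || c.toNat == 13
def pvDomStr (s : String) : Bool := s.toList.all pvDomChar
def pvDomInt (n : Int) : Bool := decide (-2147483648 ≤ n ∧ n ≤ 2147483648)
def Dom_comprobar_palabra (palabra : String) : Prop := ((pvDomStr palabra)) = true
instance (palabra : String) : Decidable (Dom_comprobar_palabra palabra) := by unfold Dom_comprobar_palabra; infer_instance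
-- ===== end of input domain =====

-- B replaces the per-character ord-range scan (plus a separate space check) by bounding only
-- the extremal characters: min/max of the lowered string against the alphabet bounds (correct because
-- the lowercase alphabet is a contiguous code-point interval). Alternative decomposition; same cost.
-- (The Python 'type(palabra) is not str' guard is vacuous under the String type and is not ported.)

-- ===== PORT A =====
def comprobar_palabra (palabra : String) : Bool :=
  if PySem.Str.isIn " " palabra then false
  else
    -- palabra = palabra.lower(); for letra in palabra: if ord>122 or ord<97: return False; return True
    (PySem.Str.lower palabra).toList.all (fun letra => !(letra.toNat > 122 || letra.toNat < 97))

-- ===== PORT B =====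
def comprobar_palabra_alt (palabra : String) : Bool :=
  let lowered := (PySem.Str.lower palabra).toList
  if lowered.isEmpty then true
  else
    match PySem.List.min? lowered (fun c => c), PySem.List.max? lowered (fun c => c) with
    | some m, some mx => decide ('a' ≤ m) && decide (mx ≤ 'z')
    | _, _ => false  -- unreachable: min/max of a nonempty list exist (Python min/max raise only on empty)

-- ===== PRECONDITION & SPEC =====
def Spec_comprobar_palabra (palabra : String) (out : Bool) : Prop := out = comprobar_palabra_alt palabra
instance (palabra : String) (out : Bool) : Decidable (Spec_comprobar_palabra palabra out) := by unfold Spec_comprobar_palabra; infer_instance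

-- ===== CLAIM (what is proved, stated in full; the proofs are below) =====
def Claim_equal_comprobar_palabra : Prop := ∀ (palabra : String), Dom_comprobar_palabra palabra → Spec_comprobar_palabra palabra (comprobar_palabra palabra)

-- ===== LEMMAS AND PROOFS =====

lemma char_le_iff_toNat (a b : Char) : a ≤ b ↔ a.toNat ≤ b.toNat := by
  rw [Char.le_def, UInt32.le_iff_toNat_le]; rfl

-- B is true exactly when every character of the lowered string lies in the a-z code interval
lemma alt_iff_all (palabra : String) :
    comprobar_palabra_alt palabra = true ↔
      ∀ c ∈ (PySem.Str.lower palabra).toList, 97 ≤ c.toNat ∧ c.toNat ≤ 122 := by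
  unfold comprobar_palabra_alt
  set l := (PySem.Str.lower palabra).toList with hl
  by_cases hnil : l = []
  · simp [hnil]
  · have hie : l.isEmpty = false := by simpa [List.isEmpty_iff] using hnil
    simp only [hie]
    simp only [Bool.false_eq_true, if_false]
    obtain ⟨m, hm⟩ : ∃ m, PySem.List.min? l (fun c => c) = some m := by
      cases h : PySem.List.min? l (fun c => c) with
      | none => exact absurd ((PySem.List.min?_eq_none_iff l _).1 h) hnil
      | some m => exact ⟨m, rfl⟩
    obtain ⟨mx, hmx⟩ : ∃ mx, PySem.List.max? l (fun c => c) = some mx := by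
      cases h : PySem.List.max? l (fun c => c) with
      | none => exact absurd ((PySem.List.max?_eq_none_iff l _).1 h) hnil
      | some m => exact ⟨m, rfl⟩
    rw [hm, hmx]
    simp only [Bool.and_eq_true, decide_eq_true_eq]
    constructor
    · rintro ⟨h1, h2⟩ c hc
      have hmc := PySem.List.min?_isMin hm c hc
      have hcx := PySem.List.max?_isMax hmx c hc
      rw [char_le_iff_toNat] at h1 h2 hmc hcx
      have : ('a' : Char).toNat = 97 := by decide
      have : ('z' : Char).toNat = 122 := by decide
      omega
    · intro h
      have h1 := h m (PySem.List.min?_mem hm)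
      have h2 := h mx (PySem.List.max?_mem hmx)
      rw [char_le_iff_toNat, char_le_iff_toNat]
      have : ('a' : Char).toNat = 97 := by decide
      have : ('z' : Char).toNat = 122 := by decide
      omega

lemma singleton_infix_iff_mem (c : Char) (l : List Char) : [c] <:+: l ↔ c ∈ l := by
  constructor
  · intro h; exact h.mem (List.mem_singleton_self c)
  · intro h
    obtain ⟨s, t, rfl⟩ := List.append_of_mem h
    exact ⟨s, t, by simp⟩

theorem comprobar_palabra_spec : Claim_equal_comprobar_palabra := by
  intro palabra _
  unfold Spec_comprobar_palabra comprobar_palabra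
  by_cases hsp : ' ' ∈ palabra.toList
  · have hin : PySem.Str.isIn " " palabra = true := by
      simp only [PySem.Str.isIn]
      exact (PySem.Chars.isIn_iff_infix _ _).2 ((singleton_infix_iff_mem _ _).2 hsp)
    rw [hin]
    have hmem : ' ' ∈ (PySem.Str.lower palabra).toList := by
      rw [PySem.Str.toList_lower]
      have : PySem.Chars.lowerChar ' ' = ' ' := by decide
      exact this ▸ List.mem_map_of_mem hsp
    simp only [if_true]
    symm
    rw [← Bool.not_eq_true]
    intro h
    have := ((alt_iff_all palabra).1 h ' ' hmem).1
    simp at this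
  · have hnin : PySem.Str.isIn " " palabra = false := by
      simp only [PySem.Str.isIn]
      rw [PySem.Chars.isIn_eq_false_iff]
      intro h
      exact hsp ((singleton_infix_iff_mem _ _).1 h)
    rw [hnin]
    simp only [Bool.false_eq_true, if_false]
    rw [Bool.eq_iff_iff, alt_iff_all, List.all_eq_true]
    constructor
    · intro h c hc
      have := h c hc
      simp only [Bool.not_eq_true', Bool.or_eq_false_iff, decide_eq_false_iff_not, not_lt] at this
      omega
    · intro h c hc
      have := h c hc
      simp only [Bool.not_eq_true', Bool.or_eq_false_iff, decide_eq_false_iff_not, not_lt]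
      omega
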